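-- pv_equiv track=rewrite | github.com/cspyo/INFRA-study | week4/sns/event_handler.py | count_unordered_events
-- ===== SOURCE A (Python) =====
-- def count_unordered_events(events):
--     unordered_events = 0
--     max_timestamp = float('-inf')
--     for timestamp in events:
--         if timestamp < max_timestamp:
--             unordered_events += 1
--         else:
--             max_timestamp = timestamp
--     return unordered_events
-- ===== SOURCE B (Python) =====
-- def count_unordered_events(events):
--     # First pass: prefix_before[i] = running maximum of events[:i] (None if empty prefix).
--     prefix_before = []
--     m = None
--     for ts in events:
--         prefix_before.append(m)
--         if m is None or not (ts < m):
--             m = ts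
--     # Second pass: count elements strictly below the running max before them.
--     return sum(1 for i, ts in enumerate(events)
--                if prefix_before[i] is not None and ts < prefix_before[i])
-- ===== Notes on version B (the rewrite author's own statement) =====
-- stated objective: alternative
-- what changed: Replaced the single fused accumulate-and-count loop by a two-pass structure: a first pass builds the prefix running-maximum table, a second pass counts elements strictly below their prefix maximum.
import Mathlib
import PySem

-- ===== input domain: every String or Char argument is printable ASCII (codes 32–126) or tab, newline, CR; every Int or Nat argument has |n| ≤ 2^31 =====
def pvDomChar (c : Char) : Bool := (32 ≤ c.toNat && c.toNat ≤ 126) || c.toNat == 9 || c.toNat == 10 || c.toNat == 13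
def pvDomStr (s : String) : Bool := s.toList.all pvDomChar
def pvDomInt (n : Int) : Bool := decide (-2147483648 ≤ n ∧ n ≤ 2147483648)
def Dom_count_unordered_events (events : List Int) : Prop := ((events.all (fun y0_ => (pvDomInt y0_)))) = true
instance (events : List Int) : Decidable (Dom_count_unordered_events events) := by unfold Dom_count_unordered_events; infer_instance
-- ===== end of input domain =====

-- B replaces A's fused accumulate-and-count loop by a two-pass prefix-maximum table; same cost, alternative structure.

-- ===== PORT A =====
-- A's single loop: state = (unordered_events, max_timestamp); float('-inf') modelled as Option.none
-- (ts < -inf is always false, so the else branch always fires on none — exact for Int inputs).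
def count_unordered_events (events : List Int) : Int :=
  (events.foldl
    (fun (s : Int × Option Int) ts =>
      match s.2 with
      | some m => if ts < m then (s.1 + 1, s.2) else (s.1, some ts)
      | none => (s.1, some ts))
    (0, none)).1

-- ===== PORT B =====
-- Source B pass 1: build prefix_before (running max just before each element; none for the first).
def count_unordered_events_alt (events : List Int) : Int :=
  let prefixBefore :=
    (events.foldl
      (fun (s : List (Option Int) × Option Int) ts =>
        (s.1 ++ [s.2],
         match s.2 with
         | some m => if ts < m then some m else some ts
         | none => some ts))
      ([], none)).1
  -- Source B pass 2: count positions with a prior max strictly above the element.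
  ((events.zip prefixBefore).filter
      (fun p => match p.2 with
        | some m => p.1 < m
        | none => false)).length

-- ===== PRECONDITION & SPEC =====
def Spec_count_unordered_events (events : List Int) (out : Int) : Prop := out = count_unordered_events_alt events
instance (events : List Int) (out : Int) : Decidable (Spec_count_unordered_events events out) := by unfold Spec_count_unordered_events; infer_instance

-- ===== CLAIM (what is proved, stated in full; the proofs are below) =====
def Claim_equal_count_unordered_events : Prop := ∀ (events : List Int), Dom_count_unordered_events events → Spec_count_unordered_events events (count_unordered_events events)

-- ===== LEMMAS AND PROOFS =====

-- step of the running maximum (shared shape of both folds' second component)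
def pvStep (m : Option Int) (ts : Int) : Option Int :=
  match m with
  | some mv => if ts < mv then some mv else some ts
  | none => some ts

-- recursive characterisation of the count starting from running max m
def pvCount (events : List Int) (m : Option Int) : Int :=
  match events with
  | [] => 0
  | ts :: rest =>
    (match m with
     | some mv => if ts < mv then (1 : Int) else 0
     | none => 0) + pvCount rest (pvStep m ts)

theorem pvA_fold (events : List Int) (c : Int) (m : Option Int) :
    (events.foldl
      (fun (s : Int × Option Int) ts =>
        match s.2 with
        | some mv => if ts < mv then (s.1 + 1, s.2) else (s.1, some ts)
        | none => (s.1, some ts))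
      (c, m)).1 = c + pvCount events m := by
  induction events generalizing c m with
  | nil => simp [pvCount]
  | cons ts rest ih =>
    cases m with
    | none => simp [pvCount, pvStep, ih]
    | some mv =>
      by_cases h : ts < mv <;> (simp [pvCount, pvStep, h, ih]; try ring)

-- the prefix fold produces acc ++ pvPrefix events m (and threads pvStep)
def pvPrefix (events : List Int) (m : Option Int) : List (Option Int) :=
  match events with
  | [] => []
  | ts :: rest => m :: pvPrefix rest (pvStep m ts)

theorem pvB_fold (events : List Int) (acc : List (Option Int)) (m : Option Int) :
    (events.foldl
      (fun (s : List (Option Int) × Option Int) ts =>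
        (s.1 ++ [s.2],
         match s.2 with
         | some mv => if ts < mv then some mv else some ts
         | none => some ts))
      (acc, m)).1 = acc ++ pvPrefix events m := by
  induction events generalizing acc m with
  | nil => simp [pvPrefix]
  | cons ts rest ih =>
    cases m with
    | none => simp [pvPrefix, pvStep, ih]
    | some mv => by_cases h : ts < mv <;> simp [pvPrefix, pvStep, h, ih]

theorem pvZip_count (events : List Int) (m : Option Int) :
    (((events.zip (pvPrefix events m)).filter
        (fun p => match p.2 with
          | some mv => p.1 < mv
          | none => false)).length : Int) = pvCount events m := by
  induction events generalizing m with
  | nil => simp [pvPrefix, pvCount]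
  | cons ts rest ih =>
    cases m with
    | none => simp [pvPrefix, pvCount, List.zip_cons_cons, ih, pvStep]
    | some mv =>
      by_cases h : ts < mv <;>
        simp [pvPrefix, pvCount, List.zip_cons_cons, h, ih, pvStep] <;> ring

-- ===== VERDICT (by name: the statement is the Claim_ definition above) =====
theorem count_unordered_events_spec : Claim_equal_count_unordered_events := by
  intro events _
  unfold Spec_count_unordered_events count_unordered_events count_unordered_events_alt
  rw [pvA_fold, pvB_fold, List.nil_append, pvZip_count]
  ring
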